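-- pv_equiv track=rewrite | github.com/dlink/vreports | lib/reportfilters.py | listToTable
-- ===== SOURCE A (Python) =====
-- def listToTable(alist):
--     '''Given a list of tuples
--        Return a table of N Columns as a list of tuples
--
--        [ a,b           [ a,b,G,H,
--          c,d   -->       c,d,I,J,
--          e,f             e,f,K,L ]
--          G,H
--          I,J
--          K,L ]
--     '''
--     NUM_COL = 2
--     num_elements = len(alist)
--     remander     = num_elements % NUM_COL
--     num_rows     = num_elements // NUM_COL
--     row_num = 0
--
--     rows = [ [] for x in range(num_rows+1)]
--     i = 0
--     for el in alist:
--         i += 1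
--         rows[row_num].extend(el)
--         row_num += 1
--         if (row_num >= num_rows and not remander) or row_num > num_rows:
--             if row_num > num_rows:
--                 remander -= 1
--             row_num = 0
--     return rows
-- ===== SOURCE B (Python) =====
-- def listToTable(alist):
--     n = len(alist)
--     num_rows = n // 2
--     half = (n + 1) // 2          # size of column 1 (ceil)
--     rows = [[] for _ in range(num_rows + 1)]
--     for i, el in enumerate(alist[:half]):
--         rows[i].extend(el)
--     for i, el in enumerate(alist[half:]):
--         rows[i].extend(el)
--     return rows
-- ===== Notes on version B (the rewrite author's own statement) =====
-- stated objective: simpler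
-- what changed: Replaces A's single pass with a stateful row pointer, remainder counter and mid-loop reset logic by computing the column split up front (half = ceil(n/2)), slicing the list into two columns and running two plain index-aligned enumerate loops.
import Mathlib
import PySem

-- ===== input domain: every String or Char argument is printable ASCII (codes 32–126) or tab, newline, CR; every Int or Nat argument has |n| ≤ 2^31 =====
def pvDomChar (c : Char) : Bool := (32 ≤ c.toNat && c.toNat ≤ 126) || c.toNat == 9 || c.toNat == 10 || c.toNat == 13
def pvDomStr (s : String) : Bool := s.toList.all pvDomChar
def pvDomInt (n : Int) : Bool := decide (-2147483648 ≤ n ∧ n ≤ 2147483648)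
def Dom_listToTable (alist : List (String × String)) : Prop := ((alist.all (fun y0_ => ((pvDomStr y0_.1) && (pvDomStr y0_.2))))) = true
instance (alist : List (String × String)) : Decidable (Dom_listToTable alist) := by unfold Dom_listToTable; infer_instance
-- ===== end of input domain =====

-- B replaces A's stateful counter/reset row pointer with an explicit split of the input
-- into two column slices and two index-aligned passes (objective: simpler).

-- ===== PORT A =====
-- loop body of A's single 'for el in alist' loop; state = (i, row_num, remander, rows).
-- row_num is never negative (it starts at 0, is incremented, or reset to 0), so
-- '.toNat' on it is exact for Python's rows[row_num] here.
def aStep (num_rows : Int) (s : Int × Int × Int × List (List String)) (el : String × String) :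
    Int × Int × Int × List (List String) :=
  let i := s.1 + 1
  let rows := s.2.2.2.modify s.2.1.toNat (fun row => row ++ [el.1, el.2])  -- rows[row_num].extend(el)
  let row_num := s.2.1 + 1
  if (num_rows ≤ row_num ∧ s.2.2.1 = 0) ∨ num_rows < row_num then
    if num_rows < row_num then (i, 0, s.2.2.1 - 1, rows) else (i, 0, s.2.2.1, rows)
  else (i, row_num, s.2.2.1, rows)

def listToTable (alist : List (String × String)) : List (List String) :=
  let NUM_COL : Int := 2
  let num_elements : Int := (alist.length : Int)
  let remander := PySem.Int.mod num_elements NUM_COL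
  let num_rows := PySem.Int.floordiv num_elements NUM_COL
  let rows : List (List String) := (PySem.List.pyRange 0 (num_rows + 1) 1).map (fun _ => [])
  (alist.foldl (aStep num_rows) (0, 0, remander, rows)).2.2.2

-- ===== PORT B =====
-- body of B's 'for i, el in enumerate(col): rows[i].extend(el)' loops (i ≥ 0, so .toNat is exact)
def bStep (rows : List (List String)) (p : Int × (String × String)) : List (List String) :=
  rows.modify p.1.toNat (fun row => row ++ [p.2.1, p.2.2])

def listToTable_alt (alist : List (String × String)) : List (List String) :=
  let n : Int := (alist.length : Int)
  let num_rows := PySem.Int.floordiv n 2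
  let half := PySem.Int.floordiv (n + 1) 2
  let rows : List (List String) := (PySem.List.pyRange 0 (num_rows + 1) 1).map (fun _ => [])
  let rows := (PySem.List.enumerate (PySem.List.slice alist none (some half)) 0).foldl bStep rows
  (PySem.List.enumerate (PySem.List.slice alist (some half) none) 0).foldl bStep rows

-- ===== PRECONDITION & SPEC =====
def Spec_listToTable (alist : List (String × String)) (out : List (List String)) : Prop := out = listToTable_alt alist
instance (alist : List (String × String)) (out : List (List String)) : Decidable (Spec_listToTable alist out) := by unfold Spec_listToTable; infer_instance

-- ===== CLAIM (what is proved, stated in full; the proofs are below) =====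
def Claim_equal_listToTable : Prop := ∀ (alist : List (String × String)), Dom_listToTable alist → Spec_listToTable alist (listToTable alist)

-- ===== LEMMAS AND PROOFS =====

-- A's loop over a block of elements that fits before the next pointer reset behaves as an
-- index-aligned pass: rows r, r+1, … get extended in order, and the pointer/remainder are
-- reset to 0 exactly when the block reaches the reset threshold num_rows + remander.
theorem aStep_run (num_rows : Int) (l : List (String × String)) :
    ∀ (i r rem : Int) (rows : List (List String)),
    0 ≤ r → (rem = 0 ∨ rem = 1) →
    r + (l.length : Int) ≤ num_rows + rem →
    l.foldl (aStep num_rows) (i, r, rem, rows)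
      = (i + (l.length : Int),
         (if r + (l.length : Int) = num_rows + rem ∧ 0 < l.length then (0:Int) else r + (l.length : Int)),
         (if r + (l.length : Int) = num_rows + rem ∧ 0 < l.length then (0:Int) else rem),
         (PySem.List.enumerate l r).foldl bStep rows) := by
  induction l with
  | nil =>
    intro i r rem rows hr hrem hlen
    simp [PySem.List.enumerate]
  | cons x t ih =>
    intro i r rem rows hr hrem hlen
    rw [List.foldl_cons, PySem.List.enumerate_cons, List.foldl_cons]
    simp only [List.length_cons] at hlen ⊢
    push_cast at hlen ⊢
    by_cases hC : (num_rows ≤ r + 1 ∧ rem = 0) ∨ num_rows < r + 1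
    · -- the reset fires: under hlen this forces t = []
      have ht : t.length = 0 := by rcases hrem with h0 | h1 <;> omega
      have ht' : t = [] := List.length_eq_zero_iff.mp ht
      subst ht'
      have heq : r + 1 = num_rows + rem := by rcases hrem with h0 | h1 <;> omega
      simp only [aStep, hC, if_pos, List.foldl_nil, PySem.List.enumerate_nil]
      rcases hrem with h0 | h1
      · have hlt : ¬ num_rows < r + 1 := by omega
        simp [h0, bStep, heq]
      · have hlt : num_rows < r + 1 := by omega
        simp [h1, bStep, heq]
    · -- no reset: continue with row pointer r+1
      have hr1 : r + 1 < num_rows + rem := by rcases hrem with h0 | h1 <;> omega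
      simp only [aStep]
      rw [if_neg hC]
      rw [ih (i + 1) (r + 1) rem _ (by omega) hrem (by omega)]
      have hiff : (r + ((t.length : Int) + 1) = num_rows + rem ∧ 0 < t.length + 1)
          ↔ ((r + 1) + (t.length : Int) = num_rows + rem ∧ 0 < t.length) := by
        constructor
        · rintro ⟨he, -⟩
          refine ⟨by omega, ?_⟩
          by_contra h
          have : (t.length : Int) = 0 := by omega
          omega
        · rintro ⟨he, hp⟩; exact ⟨by omega, by omega⟩
      have e1 : i + 1 + (t.length : Int) = i + ((t.length : Int) + 1) := by ring
      have e2 : r + 1 + (t.length : Int) = r + ((t.length : Int) + 1) := by ring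
      simp only [hiff, bStep, e1, e2]

theorem listToTable_eq_alt (alist : List (String × String)) :
    listToTable alist = listToTable_alt alist := by
  simp only [listToTable, listToTable_alt]
  set len := alist.length with hlen
  have h2 : PySem.Int.floordiv (len : Int) 2 = ((len / 2 : Nat) : Int) := by
    exact_mod_cast PySem.Int.floordiv_natCast len 2
  have hmod : PySem.Int.mod (len : Int) 2 = ((len % 2 : Nat) : Int) := by
    exact_mod_cast PySem.Int.mod_natCast len 2
  have hhalf : PySem.Int.floordiv ((len : Int) + 1) 2 = (((len + 1) / 2 : Nat) : Int) := by
    have := PySem.Int.floordiv_natCast (len + 1) 2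
    push_cast at this ⊢
    exact this
  set h : Nat := (len + 1) / 2 with hh
  have hhle : h ≤ len := by omega
  -- B side: slices are take/drop
  rw [hmod, h2, hhalf]
  rw [PySem.List.slice_to_natCast, PySem.List.slice_from_natCast]
  -- A side: split the loop at the column boundary
  conv_lhs => rw [← List.take_append_drop h alist, List.foldl_append]
  have hlt : (alist.take h).length = h := by
    simp [List.length_take, hhle, ← hlen]
  have hld : (alist.drop h).length = len - h := by simp [← hlen]
  -- phase 1: the first h elements fill rows 0..h-1 and leave (h, 0, 0, rows₁)
  rw [aStep_run ((len / 2 : Nat) : Int) (alist.take h) 0 0 ((len % 2 : Nat) : Int) _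
        le_rfl (by omega) (by rw [hlt]; omega)]
  have hfire1 : (0 : Int) + ((alist.take h).length : Int) = ((len / 2 : Nat) : Int) + ((len % 2 : Nat) : Int)
      := by rw [hlt]; push_cast; omega
  by_cases hz : len = 0
  · -- empty input: both folds are empty
    have : alist = [] := by rw [← List.length_eq_zero_iff, ← hlen]; exact hz
    subst this
    simp
  · have hpos : 0 < (alist.take h).length := by rw [hlt]; omega
    rw [if_pos ⟨hfire1, hpos⟩, if_pos ⟨hfire1, hpos⟩]
    -- phase 2: the remaining len - h = len/2 elements fill rows 0..len/2-1
    rw [aStep_run ((len / 2 : Nat) : Int) (alist.drop h) _ 0 0 _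
        le_rfl (Or.inl rfl) (by rw [hld]; push_cast; omega)]

-- ===== VERDICT (by name: the statement is the Claim_ definition above) =====
theorem listToTable_spec : Claim_equal_listToTable := by
  intro alist _
  unfold Spec_listToTable
  exact listToTable_eq_alt alist
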